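-- pv_equiv track=rewrite | github.com/alexsuhor/python_ex | list.py | one_to_three
-- ===== SOURCE A (Python) =====
-- def one_to_three(word):
--     first = ''
--     second = ''
--     third = ''
--     for i in range(len(word)):
--         if i % 3 == 0:
--             first += word[i]
--         elif i % 3 == 1:
--             second += word[i]
--         else:
--             third += word[i]
--     return (first, second, third)
-- ===== SOURCE B (Python) =====
-- def one_to_three(word):
--     return (word[0::3], word[1::3], word[2::3])
-- ===== Notes on version B (the rewrite author's own statement) =====
-- stated objective: faster
-- what changed: Replaces the per-character index loop with mod-3 branching and string += by three strided slices word[0::3], word[1::3], word[2::3], one per residue class.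
import Mathlib
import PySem

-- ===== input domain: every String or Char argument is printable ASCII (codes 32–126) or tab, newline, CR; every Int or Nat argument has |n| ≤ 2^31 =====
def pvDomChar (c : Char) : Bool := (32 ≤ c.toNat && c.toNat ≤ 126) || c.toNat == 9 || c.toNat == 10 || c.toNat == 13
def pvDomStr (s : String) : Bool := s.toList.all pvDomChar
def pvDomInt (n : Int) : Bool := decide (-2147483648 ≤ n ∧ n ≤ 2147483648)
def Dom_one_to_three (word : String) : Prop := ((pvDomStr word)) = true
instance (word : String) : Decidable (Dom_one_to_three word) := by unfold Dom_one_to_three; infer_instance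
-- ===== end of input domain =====

-- B replaces A's mod-3 branching index loop (with string +=) by three strided slices word[r::3].

-- ===== PORT A =====
-- the loop body of A: for index i, append word[i] to the component selected by i % 3
def otStep (cs : List Char) (st : String × String × String) (i : Int) : String × String × String :=
  let c := PySem.List.pyGetD cs i ' '   -- word[i]; i is always in range here, so the default is never used
  if i % 3 = 0 then (st.1.push c, st.2.1, st.2.2)
  else if i % 3 = 1 then (st.1, st.2.1.push c, st.2.2)
  else (st.1, st.2.1, st.2.2.push c)

def one_to_three (word : String) : String × String × String :=
  let cs := word.toList
  (PySem.List.pyRange 0 (cs.length : Int) 1).foldl (otStep cs) ("", "", "")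

-- ===== PORT B =====
def one_to_three_alt (word : String) : String × String × String :=
  ((PySem.Str.slice? word (some 0) none 3).getD "",
   (PySem.Str.slice? word (some 1) none 3).getD "",
   (PySem.Str.slice? word (some 2) none 3).getD "")

-- ===== PRECONDITION & SPEC =====
def Spec_one_to_three (word : String) (out : String × String × String) : Prop := out = one_to_three_alt word
instance (word : String) (out : String × String × String) : Decidable (Spec_one_to_three word out) := by unfold Spec_one_to_three; infer_instance

-- ===== CLAIM (what is proved, stated in full; the proofs are below) =====
def Claim_equal_one_to_three : Prop := ∀ (word : String), Dom_one_to_three word → Spec_one_to_three word (one_to_three word)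

-- ===== LEMMAS AND PROOFS =====

-- every third element of a list, starting at its head
def every3 : List Char → List Char
  | [] => []
  | c :: rest => c :: every3 (rest.drop 2)
termination_by l => l.length
decreasing_by simp

-- the three residue classes of a list, split three elements at a time
def chunk3 : List Char → List Char × List Char × List Char
  | [] => ([], [], [])
  | [a] => ([a], [], [])
  | [a, b] => ([a], [b], [])
  | a :: b :: c :: r => (a :: (chunk3 r).1, b :: (chunk3 r).2.1, c :: (chunk3 r).2.2)

lemma chunk3_eq (ys : List Char) :
    chunk3 ys = (every3 ys, every3 (ys.drop 1), every3 (ys.drop 2)) := by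
  induction ys using chunk3.induct with
  | case1 => simp [chunk3, every3]
  | case2 a => simp [chunk3, every3]
  | case3 a b => simp [chunk3, every3]
  | case4 a b c r ih => simp [chunk3, every3, ih, List.drop_one]

lemma fm_every3 (ys : List Char) :
    List.filterMap (fun k => ys[3*k]?) (List.range ((ys.length + 2)/3)) = every3 ys := by
  induction ys using every3.induct with
  | case1 => simp [every3]
  | case2 c rest ih =>
    have hc : ((c :: rest).length + 2)/3 = ((rest.drop 2).length + 2)/3 + 1 := by
      simp [List.length_drop]; omega
    have hstep : ∀ k : ℕ, (c :: rest)[3*(k+1)]? = (rest.drop 2)[3*k]? := by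
      intro k
      have h3 : 3*(k+1) = 3 + 3*k := by ring
      rw [h3, ← List.getElem?_drop]
      rfl
    rw [hc, List.range_succ_eq_map, List.filterMap_cons]
    simp only [List.getElem?_cons_zero, Nat.mul_zero]
    rw [List.filterMap_map]
    simp only [Function.comp_def, Nat.succ_eq_add_one, hstep, ih, every3]

lemma slice3_eq (xs : List Char) (r : ℕ) :
    PySem.List.slice? xs (some (r:Int)) none 3 = some (every3 (xs.drop r)) := by
  have hr0 : ¬ ((r:Int) < 0) := by omega
  unfold PySem.List.slice? PySem.List.sliceIndices
  norm_num [hr0]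
  by_cases hr : xs.length ≤ r
  · have h1 : min (r:Int) (xs.length:Int) = (xs.length:Int) := by omega
    have h2 : ¬ ((min (r:Int) (xs.length:Int)) < (xs.length:Int)) := by omega
    rw [h1] at *
    simp [h2, List.drop_eq_nil_of_le hr, every3]
  · push_neg at hr
    have h1 : min (r:Int) (xs.length:Int) = (r:Int) := by omega
    rw [h1]
    have h2 : (r:Int) < (xs.length:Int) := by omega
    rw [if_pos hr]
    have hcnt : (((xs.length:Int) - r + 3 - 1)/3).toNat = ((xs.drop r).length + 2)/3 := by
      simp [List.length_drop]; omega
    rw [hcnt, ← fm_every3 (xs.drop r)]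
    apply List.filterMap_congr
    intro k _
    have h3 : ((r:Int) + 3 * (k:Int)).toNat = r + 3*k := by omega
    rw [h3, ← List.getElem?_drop]

lemma push_eq_append (f : String) (a : Char) :
    f.push a = f ++ String.ofList [a] := by
  apply String.toList_injective; simp

lemma append_ofList_nil (s : String) : s ++ String.ofList [] = s := by
  apply String.toList_injective; simp

lemma append_ofList_ofList (s : String) (l1 l2 : List Char) :
    s ++ String.ofList l1 ++ String.ofList l2 = s ++ String.ofList (l1 ++ l2) := by
  apply String.toList_injective; simp

lemma foldA_gen (cs : List Char) (rest : List Char) (p : ℕ) (hd : cs.drop p = rest)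
    (hp : p % 3 = 0) (f s t : String) :
    (PySem.List.pyRange (p:Int) (cs.length:Int) 1).foldl (otStep cs) (f, s, t)
    = (f ++ String.ofList (chunk3 rest).1,
       s ++ String.ofList (chunk3 rest).2.1,
       t ++ String.ofList (chunk3 rest).2.2) := by
  induction rest using chunk3.induct generalizing p f s t with
  | case1 =>
    have hlen : cs.length ≤ p := by
      have := congrArg List.length hd; simp [List.length_drop] at this; omega
    rw [PySem.List.pyRange_one_eq_nil (by exact_mod_cast hlen)]
    simp [chunk3, append_ofList_nil]
  | case2 a =>
    have hlen : cs.length = p + 1 := by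
      have := congrArg List.length hd; simp [List.length_drop] at this; omega
    have hga : cs[p]? = some a := by
      have : (cs.drop p)[0]? = cs[p+0]? := List.getElem?_drop
      simp [hd] at this; simpa using this.symm
    have hplt : (p:Int) < (cs.length:Int) := by omega
    rw [PySem.List.pyRange_one_cons hplt, List.foldl_cons]
    have hm0 : ((p:Int)) % 3 = 0 := by omega
    simp only [otStep, PySem.List.pyGetD_natCast, hga, Option.getD_some, hm0, if_true]
    rw [show (p:Int) + 1 = ((p+1:ℕ):Int) by push_cast; ring,
        PySem.List.pyRange_one_eq_nil (by omega)]
    simp [chunk3, hga, push_eq_append, append_ofList_nil]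
  | case3 a b =>
    have hlen : cs.length = p + 2 := by
      have := congrArg List.length hd; simp [List.length_drop] at this; omega
    have hga : cs[p]? = some a := by
      have : (cs.drop p)[0]? = cs[p+0]? := List.getElem?_drop
      simp [hd] at this; simpa using this.symm
    have hgb : cs[p+1]? = some b := by
      have : (cs.drop p)[1]? = cs[p+1]? := List.getElem?_drop
      simp [hd] at this; simpa using this.symm
    have hplt : (p:Int) < (cs.length:Int) := by omega
    rw [PySem.List.pyRange_one_cons hplt, List.foldl_cons]
    have hm0 : ((p:Int)) % 3 = 0 := by omega
    simp only [otStep, PySem.List.pyGetD_natCast, hga, Option.getD_some, hm0, if_true]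
    have hplt1 : (p:Int) + 1 < (cs.length:Int) := by omega
    rw [PySem.List.pyRange_one_cons hplt1, List.foldl_cons]
    have hm1 : ((p:Int) + 1) % 3 = 1 := by omega
    have hm1' : ¬ ((p:Int) + 1) % 3 = 0 := by omega
    rw [show (p:Int) + 1 = ((p+1:ℕ):Int) by push_cast; ring] at hm1 hm1' ⊢
    simp only [otStep, PySem.List.pyGetD_natCast, hgb, Option.getD_some, hm1, hm1',
      if_false, if_true]
    rw [show ((p+1:ℕ):Int) + 1 = ((p+2:ℕ):Int) by push_cast; ring,
        PySem.List.pyRange_one_eq_nil (by omega)]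
    simp [chunk3, hga, hgb, push_eq_append, append_ofList_nil]
  | case4 a b c r ih =>
    have hlen : cs.length = p + 3 + r.length := by
      have := congrArg List.length hd; simp [List.length_drop] at this; omega
    have hga : cs[p]? = some a := by
      have : (cs.drop p)[0]? = cs[p+0]? := List.getElem?_drop
      simp [hd] at this; simpa using this.symm
    have hgb : cs[p+1]? = some b := by
      have : (cs.drop p)[1]? = cs[p+1]? := List.getElem?_drop
      simp [hd] at this; simpa using this.symm
    have hgc : cs[p+2]? = some c := by
      have : (cs.drop p)[2]? = cs[p+2]? := List.getElem?_drop
      simp [hd] at this; simpa using this.symm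
    have hplt : (p:Int) < (cs.length:Int) := by omega
    rw [PySem.List.pyRange_one_cons hplt, List.foldl_cons]
    have hm0 : ((p:Int)) % 3 = 0 := by omega
    simp only [otStep, PySem.List.pyGetD_natCast, hga, Option.getD_some, hm0, if_true]
    have hplt1 : (p:Int) + 1 < (cs.length:Int) := by omega
    rw [PySem.List.pyRange_one_cons hplt1, List.foldl_cons]
    have hm1 : ((p:Int) + 1) % 3 = 1 := by omega
    have hm1' : ¬ ((p:Int) + 1) % 3 = 0 := by omega
    rw [show (p:Int) + 1 = ((p+1:ℕ):Int) by push_cast; ring] at hm1 hm1' ⊢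
    simp only [otStep, PySem.List.pyGetD_natCast, hgb, Option.getD_some, hm1, hm1',
      if_false, if_true]
    have hplt2 : ((p+1:ℕ):Int) + 1 < (cs.length:Int) := by push_cast; omega
    rw [PySem.List.pyRange_one_cons hplt2, List.foldl_cons]
    have hm2 : ¬ (((p+1:ℕ):Int) + 1) % 3 = 0 := by push_cast; omega
    have hm2' : ¬ (((p+1:ℕ):Int) + 1) % 3 = 1 := by push_cast; omega
    rw [show ((p+1:ℕ):Int) + 1 = ((p+2:ℕ):Int) by push_cast; ring] at hm2 hm2' ⊢
    simp only [otStep, PySem.List.pyGetD_natCast, hgc, Option.getD_some, hm2, hm2', if_false]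
    rw [show ((p+2:ℕ):Int) + 1 = ((p+3:ℕ):Int) by push_cast; ring]
    have hd' : cs.drop (p+3) = r := by
      have : cs.drop (p+3) = (cs.drop p).drop 3 := by rw [List.drop_drop]
      rw [this, hd]; rfl
    rw [ih (p+3) hd' (by omega)]
    simp [chunk3, hga, hgb, hgc, push_eq_append, append_ofList_ofList]

lemma alt_eq (word : String) :
    one_to_three_alt word
    = (String.ofList (every3 word.toList),
       String.ofList (every3 (word.toList.drop 1)),
       String.ofList (every3 (word.toList.drop 2))) := by
  have key : ∀ r : ℕ, (PySem.Str.slice? word (some (r:Int)) none 3).getD ""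
      = String.ofList (every3 (word.toList.drop r)) := by
    intro r
    have h := PySem.Str.slice?_map word (some (r:Int)) none 3
    rw [PySem.Chars.slice?_eq_listSlice?, slice3_eq] at h
    cases hx : PySem.Str.slice? word (some (r:Int)) none 3 with
    | none => rw [hx] at h; simp at h
    | some s =>
      rw [hx] at h; simp at h
      apply String.toList_injective
      simpa using h
  unfold one_to_three_alt
  rw [show (0:Int) = ((0:ℕ):Int) by norm_num, show (1:Int) = ((1:ℕ):Int) by norm_num,
      show (2:Int) = ((2:ℕ):Int) by norm_num, key 0, key 1, key 2]
  simp

-- ===== VERDICT (by name: the statement is the Claim_ definition above) =====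
theorem one_to_three_spec : Claim_equal_one_to_three := by
  intro word _
  unfold Spec_one_to_three one_to_three
  rw [alt_eq]
  have h := foldA_gen word.toList word.toList 0 rfl rfl "" "" ""
  simp only [Nat.cast_zero] at h
  rw [h, chunk3_eq]
  have he : ∀ l : List Char, "" ++ String.ofList l = String.ofList l := by
    intro l; apply String.toList_injective; simp
  simp [he]
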